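-- pv_equiv track=rewrite | github.com/MajorGrems/og_perso | utils/UtilsDQAnalysis.py | find_common_words_with_order
-- ===== SOURCE A (Python) =====
-- def find_common_words_with_order(string_list):
--     # Convert all strings to lowercase for comparison
--     lower_string_list = [string.lower() for string in string_list]
--
--     # Split each lowercase string into words and convert them to sets
--     word_sets = [set(string.split()) for string in lower_string_list]
--
--     # Find the intersection of all sets
--     common_words = set.intersection(*word_sets)
--
--     # Create a list of common words in the order of the first string
--     final_list = [
--         word for word in string_list[0].split() if word.lower() in common_words
--     ]
--
--     # Join the common words into a single string
--     return " ".join(final_list)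
-- ===== SOURCE B (Python) =====
-- def find_common_words_with_order(string_list):
--     # Per-candidate brute force: keep each word of the first string iff every
--     # string's lowercased word list contains its lowercase form. No sets, no counts.
--     result = []
--     for w in string_list[0].split():
--         lw = w.lower()
--         if all(lw in s.lower().split() for s in string_list):
--             result.append(w)
--     return " ".join(result)
-- ===== Notes on version B (the rewrite author's own statement) =====
-- stated objective: alternative
-- what changed: Replaces the fold of set intersections with a per-candidate brute-force scan: each word of the first string is kept iff every string's lowercased word list contains it, accumulated in an explicit loop; no sets are built.
-- outside the precondition, e.g. on find_common_words_with_order([]): A raises TypeError, B raises IndexError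
import Mathlib
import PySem

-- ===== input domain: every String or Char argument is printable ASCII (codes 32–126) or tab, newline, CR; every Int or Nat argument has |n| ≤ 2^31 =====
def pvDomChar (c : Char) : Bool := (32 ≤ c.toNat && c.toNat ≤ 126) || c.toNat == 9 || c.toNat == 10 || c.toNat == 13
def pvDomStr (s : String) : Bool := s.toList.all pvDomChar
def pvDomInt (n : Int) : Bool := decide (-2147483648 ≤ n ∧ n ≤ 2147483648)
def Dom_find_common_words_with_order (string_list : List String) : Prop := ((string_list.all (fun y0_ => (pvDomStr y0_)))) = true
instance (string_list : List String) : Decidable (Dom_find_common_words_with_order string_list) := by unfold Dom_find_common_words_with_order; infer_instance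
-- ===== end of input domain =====

-- B replaces A's fold of set intersections with a per-candidate brute-force scan
-- (each first-string word is kept iff every string's lowered word list contains it).

-- ===== PORT A =====
def find_common_words_with_order (string_list : List String) : String :=
  match string_list with
  | [] => ""  -- Python: set.intersection(*[]) raises TypeError; excluded by Pre_
  | s0 :: rest =>
    -- word_sets = [set(string.lower().split()) for string in string_list]
    let ws0 : PySem.Set String := PySem.Set.ofList (PySem.Str.split₀ (PySem.Str.lower s0))
    let restSets : List (PySem.Set String) :=
      rest.map (fun s => PySem.Set.ofList (PySem.Str.split₀ (PySem.Str.lower s)))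
    -- common_words = set.intersection(*word_sets)
    let common_words := restSets.foldl PySem.Set.inter ws0
    -- final_list = [word for word in string_list[0].split() if word.lower() in common_words]
    let final_list := (PySem.Str.split₀ s0).filter
      (fun w => PySem.Set.contains common_words (PySem.Str.lower w))
    PySem.Str.join " " final_list

-- ===== PORT B =====
def find_common_words_with_order_alt (string_list : List String) : String :=
  match string_list with
  | [] => ""  -- Python: string_list[0] raises IndexError; excluded by Pre_
  | s0 :: _ =>
    let result : List String := (PySem.Str.split₀ s0).foldl
      (fun acc w =>
        let lw := PySem.Str.lower w
        if string_list.all (fun s => (PySem.Str.split₀ (PySem.Str.lower s)).contains lw)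
        then acc ++ [w] else acc) []
    PySem.Str.join " " result

-- ===== PRECONDITION & SPEC =====
-- Pre_ excludes the empty list, on which A raises TypeError (and B raises IndexError).
def Pre_find_common_words_with_order (string_list : List String) : Prop := string_list ≠ []
instance (string_list : List String) : Decidable (Pre_find_common_words_with_order string_list) := by unfold Pre_find_common_words_with_order; infer_instance
def pvWitness_find_common_words_with_order : List String := ["Hello World hello", "world HELLO x"]

def Spec_find_common_words_with_order (string_list : List String) (out : String) : Prop := out = find_common_words_with_order_alt string_list
instance (string_list : List String) (out : String) : Decidable (Spec_find_common_words_with_order string_list out) := by unfold Spec_find_common_words_with_order; infer_instance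

-- ===== CLAIM (what is proved, stated in full; the proofs are below) =====
def Claim_equal_find_common_words_with_order : Prop := ∀ (string_list : List String), Dom_find_common_words_with_order string_list → Pre_find_common_words_with_order string_list → Spec_find_common_words_with_order string_list (find_common_words_with_order string_list)

-- ===== LEMMAS AND PROOFS =====

-- A's intersection fold: membership means membership in the start set and every folded set
theorem pv_mem_foldl_inter (sets : List (PySem.Set String)) (s : PySem.Set String) (x : String) :
    x ∈ sets.foldl PySem.Set.inter s ↔ x ∈ s ∧ ∀ t ∈ sets, x ∈ t := by
  induction sets generalizing s with
  | nil => simp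
  | cons t ts ih =>
    simp [List.foldl_cons, ih, PySem.Set.mem_inter, and_assoc]

-- ===== VERDICT (by name: the statement is the Claim_ definition above) =====
theorem find_common_words_with_order_spec : Claim_equal_find_common_words_with_order := by
  intro string_list _ hpre
  unfold Spec_find_common_words_with_order
  match string_list with
  | [] => exact absurd rfl hpre
  | s0 :: rest =>
    unfold find_common_words_with_order find_common_words_with_order_alt
    simp only []
    rw [PySem.List.foldl_append_ite_eq_filter]
    congr 1
    apply List.filter_congr
    intro w _
    apply Bool.coe_iff_coe.mp
    rw [PySem.Set.contains_iff, pv_mem_foldl_inter]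
    simp [PySem.Set.mem_ofList, List.all_eq_true]
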